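-- pv_equiv track=rewrite | github.com/Morzan3/Lexer-Parser | lexer.py | is_doctype
-- ===== SOURCE A (Python) =====
-- def is_correct(regexp_def, correct_end_states, value):
--     """
--     Method checking whether given string is correct according
--     to the given regular expression definition.
--     :param regexp_def definition of a specific regular expression
--     :param correct_end_states table of correct end states
--     :value string to check
--     """
--
--     state = 0
--     for i in value:  # Going through the string checking each char
--         try:
--             state = regexp_def[state][i]
--         except KeyError:
--             return False
--
--     if state in correct_end_states:
--         return True
--     return False
--
-- def is_doctype(value):
--     """
--     Function checking whether a given string matches an text_between_tags
--     regexp : any keyboard character without ";<;>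
--     :param value: string
--     """
--
--     state_3 = {}
--
--     for char in range(32, 126 + 1):  # all keyboard chars without "
--         if char != 62:
--             state_3[chr(char)] = 3
--     state_3['>'] = 4
--
--     regexp_def = [
--         {'<': 1},
--         {'!': 2},
--         {'D': 2, 'O': 2, 'C': 2, 'T': 2, 'Y': 2, 'P': 2, 'E': 3},
--         state_3,
--         {}
--     ]
--
--     correct_end_states = {4}
--     return is_correct(regexp_def, correct_end_states, value)
-- ===== SOURCE B (Python) =====
-- def is_doctype(value):
--     """
--     String-method parse of the same DOCTYPE-like shape, without the DFA tables:
--     the opening marker, then a run of D/O/C/T/Y/P letters, then the letter E,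
--     then printable ASCII other than the closing bracket, closed by a final bracket.
--     """
--     if not (value.startswith('<!') and value.endswith('>')):
--         return False
--     rest = value[2:-1]
--     while rest and rest[0] in 'DOCTYP':
--         rest = rest[1:]
--     if not rest.startswith('E'):
--         return False
--     return all(' ' <= c <= '~' and c != '>' for c in rest[1:])
-- ===== Notes on version B (the rewrite author's own statement) =====
-- stated objective: simpler
-- what changed: Replaced the generic table-driven DFA (transition dicts built in a loop plus an interpreter helper) by a direct string parse: startswith/endswith anchors, strip the leading run of D/O/C/T/Y/P letters, require the letter E next, and check the remaining characters with all().
import Mathlib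
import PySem

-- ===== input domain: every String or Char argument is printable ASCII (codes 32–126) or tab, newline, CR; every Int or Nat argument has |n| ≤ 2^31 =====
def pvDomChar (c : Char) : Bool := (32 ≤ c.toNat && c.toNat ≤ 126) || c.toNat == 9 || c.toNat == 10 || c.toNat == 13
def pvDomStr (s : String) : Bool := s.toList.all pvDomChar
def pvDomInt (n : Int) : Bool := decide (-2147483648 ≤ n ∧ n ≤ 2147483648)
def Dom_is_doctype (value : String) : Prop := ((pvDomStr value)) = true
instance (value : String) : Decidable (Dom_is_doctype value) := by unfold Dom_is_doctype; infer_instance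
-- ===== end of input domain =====

-- B replaces A's table-driven DFA by a direct string parse (anchors + leading-run strip + all()); objective: simpler.

-- ===== PORT A =====
-- state_3 = {} ; for char in range(32,127): if char != 62: state_3[chr(char)] = 3 ; state_3['>'] = 4
def pvState3 : PySem.Dict Char Int :=
  ((PySem.List.pyRange 32 127 1).foldl
    (fun d ch => if ch ≠ 62 then d.insert (Char.ofNat ch.toNat) 3 else d)
    PySem.Dict.empty).insert '>' 4

def pvRegexpDef : List (PySem.Dict Char Int) :=
  [ PySem.Dict.ofList [('<', 1)],
    PySem.Dict.ofList [('!', 2)],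
    PySem.Dict.ofList [('D', 2), ('O', 2), ('C', 2), ('T', 2), ('Y', 2), ('P', 2), ('E', 3)],
    pvState3,
    PySem.Dict.ofList [] ]

-- the loop of is_correct; 'except KeyError: return False' is the none branch of get?.
-- regexp_def[state] uses pyGet?; its none (IndexError) branch is unreachable here (states are 0..4).
def pvIsCorrectGo (regexp_def : List (PySem.Dict Char Int)) (correct_end_states : PySem.Set Int) :
    Int → List Char → Bool
  | state, [] => correct_end_states.contains state
  | state, c :: cs =>
    match PySem.List.pyGet? regexp_def state with
    | none => false
    | some d =>
      match d.get? c with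
      | none => false
      | some s' => pvIsCorrectGo regexp_def correct_end_states s' cs

def is_correct (regexp_def : List (PySem.Dict Char Int)) (correct_end_states : PySem.Set Int)
    (value : String) : Bool :=
  pvIsCorrectGo regexp_def correct_end_states 0 value.toList

def is_doctype (value : String) : Bool :=
  is_correct pvRegexpDef (PySem.Set.ofList [4]) value

-- ===== PORT B =====
-- while rest and rest[0] in 'DOCTYP': rest = rest[1:]
def pvDropDOCTYP : List Char → List Char
  | [] => []
  | c :: cs => if c ∈ ['D', 'O', 'C', 'T', 'Y', 'P'] then pvDropDOCTYP cs else c :: cs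

-- ' ' <= c <= '~' and c != '>'
def pvGoodChar (c : Char) : Bool := (' ' ≤ c && c ≤ '~') && c ≠ '>'

def is_doctype_alt (value : String) : Bool :=
  let cs := value.toList
  if PySem.Chars.startswith cs ['<', '!'] && PySem.Chars.endswith cs ['>'] then
    let rest := pvDropDOCTYP (PySem.Chars.slice cs (some 2) (some (-1)))
    match rest with
    | 'E' :: tail => tail.all pvGoodChar
    | _ => false
  else false

-- ===== PRECONDITION & SPEC =====
def Spec_is_doctype (value : String) (out : Bool) : Prop := out = is_doctype_alt value
instance (value : String) (out : Bool) : Decidable (Spec_is_doctype value out) := by unfold Spec_is_doctype; infer_instance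

-- ===== CLAIM (what is proved, stated in full; the proofs are below) =====
def Claim_equal_is_doctype : Prop := ∀ (value : String), Dom_is_doctype value → Spec_is_doctype value (is_doctype value)

-- ===== LEMMAS AND PROOFS =====

theorem char_toNat_inj {c d : Char} (h : c.toNat = d.toNat) : c = d := by
  rw [← Char.ofNat_toNat c, h, Char.ofNat_toNat]
theorem char_eq_ofNat (c : Char) (k : ℕ) (hk : k < 55296) : (c = Char.ofNat k) ↔ c.toNat = k := by
  constructor
  · rintro rfl
    rw [Char.toNat_ofNat, if_pos (Or.inl hk)]
  · intro h; rw [← Char.ofNat_toNat c, h]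

theorem state3_base_get (c : Char) (m : ℕ) (hm : m ≤ 95) :
    ((PySem.List.pyRange 32 (32 + (m : Int)) 1).foldl
      (fun d ch => if ch ≠ 62 then d.insert (Char.ofNat ch.toNat) 3 else d)
      (PySem.Dict.empty : PySem.Dict Char Int)).get? c =
    (if 32 ≤ c.toNat ∧ c.toNat < 32 + m ∧ c ≠ '>' then some (3:Int) else none) := by
  induction m with
  | zero =>
    rw [show ((32 : Int) + (0:ℕ)) = 32 by norm_num, PySem.List.pyRange_one_eq_nil le_rfl]
    simp only [List.foldl_nil, PySem.Dict.get?_empty]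
    rw [if_neg (by omega)]
  | succ m ih =>
    have hm' : m ≤ 95 := by omega
    rw [show ((32 : Int) + ((m+1:ℕ) : Int)) = (32 + (m:ℕ)) + 1 by push_cast; ring,
        PySem.List.pyRange_one_succ_right (by omega), List.foldl_append]
    simp only [List.foldl_cons, List.foldl_nil]
    by_cases h62 : ((32 : Int) + (m:ℕ)) = 62
    · rw [if_neg (by omega), ih hm']
      have hm30 : m = 30 := by omega
      subst hm30
      by_cases hc : c.toNat = 62
    
      · have hcg : c = '>' := char_toNat_inj (by rw [hc]; rfl)
        subst hcg
        rw [if_neg (by simp), if_neg (by simp)]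
      · by_cases hP : 32 ≤ c.toNat ∧ c.toNat < 32 + 30 ∧ c ≠ '>'
        · rw [if_pos hP, if_pos ⟨hP.1, by omega, hP.2.2⟩]
        · rw [if_neg hP, if_neg (fun ⟨a, b, d⟩ => hP ⟨a, by omega, d⟩)]
    · rw [if_pos h62, PySem.Dict.get?_insert]
      have hval : ((32:Int) + (m:ℕ)).toNat = 32 + m := by omega
      rw [hval]
      simp only [char_eq_ofNat c (32 + m) (by omega)]
      by_cases hc : c.toNat = 32 + m
      · have hne : c ≠ '>' := by
          intro h
          rw [h] at hc
          have : ('>').toNat = 62 := rfl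
          omega
        rw [if_pos hc, if_pos ⟨by omega, by omega, hne⟩]
      · rw [if_neg hc, ih hm']
        by_cases hP : 32 ≤ c.toNat ∧ c.toNat < 32 + m ∧ c ≠ '>'
        · rw [if_pos hP, if_pos ⟨hP.1, by omega, hP.2.2⟩]
        · rw [if_neg hP, if_neg (fun ⟨a, b, d⟩ => hP ⟨a, by omega, d⟩)]
theorem char_range_iff (c : Char) : (' ' ≤ c ∧ c ≤ '~') ↔ (32 ≤ c.toNat ∧ c.toNat ≤ 126) := by
  rw [Char.le_def, Char.le_def, UInt32.le_iff_toNat_le, UInt32.le_iff_toNat_le]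
  rw [show ' '.val.toNat = 32 from rfl, show '~'.val.toNat = 126 from rfl,
      show c.val.toNat = c.toNat from rfl]
theorem state3_get (c : Char) :
    pvState3.get? c =
      (if c = '>' then some 4 else if pvGoodChar c then some 3 else none) := by
  unfold pvState3
  rw [PySem.Dict.get?_insert]
  by_cases h : c = '>'
  · rw [if_pos h, if_pos h]
  · rw [if_neg h, if_neg h]
    have hb := state3_base_get c 95 le_rfl
    rw [show ((32:Int) + ((95:ℕ):Int)) = 127 by norm_num] at hb
    rw [hb]
    unfold pvGoodChar
    by_cases hg : 32 ≤ c.toNat ∧ c.toNat ≤ 126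
    · rw [if_pos ⟨hg.1, by omega, h⟩]
      have : (' ' ≤ c ∧ c ≤ '~') := (char_range_iff c).mpr hg
      simp [this.1, this.2, h]
    · rw [if_neg (by intro ⟨a, b, d⟩; exact hg ⟨a, by omega⟩)]
      have : ¬ (' ' ≤ c ∧ c ≤ '~') := fun hx => hg ((char_range_iff c).mp hx)
      by_cases h1 : ' ' ≤ c
      · have h2 : ¬ c ≤ '~' := fun hx => this ⟨h1, hx⟩
        simp [h1, h2]
      · simp [h1]
def pvHeadE (g : List Char → Bool) : List Char → Bool
  | 'E' :: t => g t
  | _ => false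

theorem pvHeadE_nil (g : List Char → Bool) : pvHeadE g [] = false := rfl

theorem pvHeadE_cons (g : List Char → Bool) (c : Char) (t : List Char) :
    pvHeadE g (c :: t) = if c = 'E' then g t else false := by
  by_cases h : c = 'E'
  · subst h; simp [pvHeadE]
  · rw [if_neg h]
    unfold pvHeadE
    split
    · rename_i heq; cases heq; exact absurd rfl h
    · rfl

theorem run4 (cs : List Char) :
    pvIsCorrectGo pvRegexpDef (PySem.Set.ofList [4]) 4 cs = cs.isEmpty := by
  cases cs with
  | nil => rfl
  | cons c cs => rfl
theorem goodChar_gt : pvGoodChar '>' = false := rfl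

set_option maxRecDepth 4000 in
theorem run3 (cs : List Char) :
    pvIsCorrectGo pvRegexpDef (PySem.Set.ofList [4]) 3 cs =
      (cs.dropLast.all pvGoodChar && (cs.getLast? == some '>')) := by
  induction cs with
  | nil => rfl
  | cons c cs ih =>
    have hstep : pvIsCorrectGo pvRegexpDef (PySem.Set.ofList [4]) 3 (c :: cs) =
        (match pvState3.get? c with
         | none => false
         | some s' => pvIsCorrectGo pvRegexpDef (PySem.Set.ofList [4]) s' cs) := rfl
    rw [hstep]
    by_cases hgt : c = '>'
    · subst hgt
      rw [show pvState3.get? '>' = some 4 from by rw [state3_get]; simp]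
      rw [show (match some (4:Int) with
         | none => false
         | some s' => pvIsCorrectGo pvRegexpDef (PySem.Set.ofList [4]) s' cs) =
         pvIsCorrectGo pvRegexpDef (PySem.Set.ofList [4]) 4 cs from rfl, run4]
      cases cs with
      | nil => rfl
      | cons d ds => simp [goodChar_gt]
    · by_cases hg : pvGoodChar c = true
      · rw [show pvState3.get? c = some 3 from by rw [state3_get, if_neg hgt, if_pos hg]]
        rw [show (match some (3:Int) with
           | none => false
           | some s' => pvIsCorrectGo pvRegexpDef (PySem.Set.ofList [4]) s' cs) =
           pvIsCorrectGo pvRegexpDef (PySem.Set.ofList [4]) 3 cs from rfl, ih]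
        cases cs with
        | nil => simp [hgt]
        | cons d ds => simp [hg]
      · have hg' : pvGoodChar c = false := by revert hg; cases pvGoodChar c <;> simp
        rw [show pvState3.get? c = none from by rw [state3_get, if_neg hgt, if_neg (by simp [hg'])]]
        rw [show (match (none : Option Int) with
           | none => false
           | some s' => pvIsCorrectGo pvRegexpDef (PySem.Set.ofList [4]) s' cs) = false from rfl]
        cases cs with
        | nil => simp [hgt]
        | cons d ds => simp [hg']
theorem dropD_cons_mem (c : Char) (cs : List Char) (h : c ∈ ['D', 'O', 'C', 'T', 'Y', 'P']) :
    pvDropDOCTYP (c :: cs) = pvDropDOCTYP cs := by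
  show (if c ∈ ['D', 'O', 'C', 'T', 'Y', 'P'] then pvDropDOCTYP cs else c :: cs) = pvDropDOCTYP cs
  rw [if_pos h]

theorem dropD_cons_not_mem (c : Char) (cs : List Char) (h : c ∉ ['D', 'O', 'C', 'T', 'Y', 'P']) :
    pvDropDOCTYP (c :: cs) = c :: cs := by
  show (if c ∈ ['D', 'O', 'C', 'T', 'Y', 'P'] then pvDropDOCTYP cs else c :: cs) = c :: cs
  rw [if_neg h]

set_option maxRecDepth 4000 in
theorem run2 (cs : List Char) :
    pvIsCorrectGo pvRegexpDef (PySem.Set.ofList [4]) 2 cs =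
      pvHeadE (fun t => t.dropLast.all pvGoodChar && (t.getLast? == some '>')) (pvDropDOCTYP cs) := by
  induction cs with
  | nil => rfl
  | cons c cs ih =>
    have hstep : pvIsCorrectGo pvRegexpDef (PySem.Set.ofList [4]) 2 (c :: cs) =
        (match (PySem.Dict.ofList [('D', (2:Int)), ('O', 2), ('C', 2), ('T', 2), ('Y', 2), ('P', 2), ('E', 3)]).get? c with
         | none => false
         | some s' => pvIsCorrectGo pvRegexpDef (PySem.Set.ofList [4]) s' cs) := rfl
    rw [hstep]
    by_cases hmem : c ∈ ['D', 'O', 'C', 'T', 'Y', 'P']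
    · have hget : (PySem.Dict.ofList [('D', (2:Int)), ('O', 2), ('C', 2), ('T', 2), ('Y', 2), ('P', 2), ('E', 3)]).get? c = some 2 := by
        fin_cases hmem <;> rfl
      rw [hget]
      rw [show (match some (2:Int) with
         | none => false
         | some s' => pvIsCorrectGo pvRegexpDef (PySem.Set.ofList [4]) s' cs) =
         pvIsCorrectGo pvRegexpDef (PySem.Set.ofList [4]) 2 cs from rfl, ih,
         dropD_cons_mem c cs hmem]
    · by_cases hE : c = 'E'
      · subst hE
        rw [show (PySem.Dict.ofList [('D', (2:Int)), ('O', 2), ('C', 2), ('T', 2), ('Y', 2), ('P', 2), ('E', 3)]).get? 'E' = some 3 from rfl]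
        rw [show (match some (3:Int) with
           | none => false
           | some s' => pvIsCorrectGo pvRegexpDef (PySem.Set.ofList [4]) s' cs) =
           pvIsCorrectGo pvRegexpDef (PySem.Set.ofList [4]) 3 cs from rfl, run3,
           dropD_cons_not_mem 'E' cs (by decide)]
        rfl
      · simp only [List.mem_cons, not_or] at hmem
        obtain ⟨h1, h2, h3, h4, h5, h6, -⟩ := hmem
        have hget : (PySem.Dict.ofList [('D', (2:Int)), ('O', 2), ('C', 2), ('T', 2), ('Y', 2), ('P', 2), ('E', 3)]).get? c = none := by
          rw [show (PySem.Dict.ofList [('D', (2:Int)), ('O', 2), ('C', 2), ('T', 2), ('Y', 2), ('P', 2), ('E', 3)]) =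
              { items := [('D', (2:Int)), ('O', 2), ('C', 2), ('T', 2), ('Y', 2), ('P', 2), ('E', 3)] } from rfl]
          simp only [PySem.Dict.get?_mk_cons, beq_iff_eq]
          rw [if_neg (fun h => h1 h.symm), if_neg (fun h => h2 h.symm), if_neg (fun h => h3 h.symm),
              if_neg (fun h => h4 h.symm), if_neg (fun h => h5 h.symm), if_neg (fun h => h6 h.symm),
              if_neg (fun h => hE h.symm)]
          rfl
        rw [hget]
        rw [show (match (none : Option Int) with
           | none => false
           | some s' => pvIsCorrectGo pvRegexpDef (PySem.Set.ofList [4]) s' cs) = false from rfl]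
        rw [dropD_cons_not_mem c cs (by simp [h1, h2, h3, h4, h5, h6]), pvHeadE_cons, if_neg hE]
theorem doctyp_facts (c : Char) (h : c ∈ ['D', 'O', 'C', 'T', 'Y', 'P']) :
    c ≠ 'E' ∧ c ≠ '>' ∧ pvGoodChar c = true := by
  fin_cases h <;> refine ⟨by decide, by decide, by decide⟩

theorem central (rest : List Char) :
    pvHeadE (fun t => t.dropLast.all pvGoodChar && (t.getLast? == some '>')) (pvDropDOCTYP rest) =
    (if rest.getLast? = some '>' then
       pvHeadE (fun t => t.all pvGoodChar) (pvDropDOCTYP rest.dropLast)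
     else false) := by
  induction rest with
  | nil => simp [show pvDropDOCTYP [] = [] from rfl, pvHeadE_nil]
  | cons c rs ih =>
    by_cases hmem : c ∈ ['D', 'O', 'C', 'T', 'Y', 'P']
    · obtain ⟨hE, hgt, hgood⟩ := doctyp_facts c hmem
      rw [dropD_cons_mem c rs hmem, ih]
      cases rs with
      | nil => rw [if_neg (by simp), if_neg (by simp [hgt])]
      | cons d ds =>
        rw [List.getLast?_cons_cons, show (c :: d :: ds).dropLast = c :: (d :: ds).dropLast from rfl,
            dropD_cons_mem c _ hmem]
    · have hndrop : ∀ l, pvDropDOCTYP (c :: l) = c :: l := fun l => dropD_cons_not_mem c l hmem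
      by_cases hE : c = 'E'
      · subst hE
        rw [hndrop rs, pvHeadE_cons, if_pos rfl]
        cases rs with
        | nil => rw [if_neg (by simp)]; simp
        | cons d ds =>
          rw [List.getLast?_cons_cons, show ('E' :: d :: ds).dropLast = 'E' :: (d :: ds).dropLast from rfl,
              hndrop _, pvHeadE_cons, if_pos rfl]
          by_cases h : (d :: ds).getLast? = some '>'
          · simp [h]
          · simp [h]
      · rw [hndrop rs, pvHeadE_cons, if_neg hE]
        cases rs with
        | nil =>
          by_cases hgt : c = '>'
          · subst hgt
            rw [if_pos (by simp), show ([('>':Char)]).dropLast = [] from rfl,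
                show pvDropDOCTYP [] = [] from rfl, pvHeadE_nil]
          · rw [if_neg (by simp [hgt])]
        | cons d ds =>
          rw [List.getLast?_cons_cons, show (c :: d :: ds).dropLast = c :: (d :: ds).dropLast from rfl,
              hndrop _, pvHeadE_cons, if_neg hE]
          simp
theorem slice_two_neg_one (c d : Char) (rest : List Char) :
    PySem.List.slice (c :: d :: rest) (some 2) (some (-1)) = rest.dropLast := by
  simp [PySem.List.slice, List.dropLast_eq_take]

theorem endswith_gt (l : List Char) :
    PySem.Chars.endswith l ['>'] = decide (l.getLast? = some '>') := by
  by_cases h : l.getLast? = some '>'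
  · obtain ⟨ys, rfl⟩ := List.getLast?_eq_some_iff.mp h
    rw [decide_eq_true h, PySem.Chars.endswith_iff]
    exact ⟨ys, rfl⟩
  · rw [decide_eq_false h]
    by_contra hb
    rw [Bool.not_eq_false, PySem.Chars.endswith_iff] at hb
    obtain ⟨t, ht⟩ := hb
    exact h (List.getLast?_eq_some_iff.mpr ⟨t, ht.symm⟩)

theorem startswith_short (l : List Char) (h : l.length < 2) :
    PySem.Chars.startswith l ['<', '!'] = false := by
  by_contra hb
  rw [Bool.not_eq_false, PySem.Chars.startswith_iff] at hb
  have := hb.length_le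
  simp at this
  omega

theorem startswith_cons_cons (c d : Char) (rest : List Char) :
    PySem.Chars.startswith (c :: d :: rest) ['<', '!'] = decide (c = '<' ∧ d = '!') := by
  by_cases h : c = '<' ∧ d = '!'
  · obtain ⟨rfl, rfl⟩ := h
    rw [decide_eq_true (⟨rfl, rfl⟩ : ('<':Char) = '<' ∧ ('!':Char) = '!'), PySem.Chars.startswith_iff]
    exact ⟨rest, rfl⟩
  · rw [decide_eq_false h]
    by_contra hb
    rw [Bool.not_eq_false, PySem.Chars.startswith_iff, List.cons_prefix_cons] at hb
    obtain ⟨h1, hb⟩ := hb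
    rw [List.cons_prefix_cons] at hb
    exact h ⟨h1.symm, hb.1.symm⟩
theorem match_eq_headE (l : List Char) :
    (match l with
     | 'E' :: tail => tail.all pvGoodChar
     | _ => false) = pvHeadE (fun t => t.all pvGoodChar) l := by
  cases l with
  | nil => rfl
  | cons c t =>
    rw [pvHeadE_cons]
    by_cases hc : c = 'E'
    · subst hc; rw [if_pos rfl]; rfl
    · rw [if_neg hc]
      split
      · rename_i heq; cases heq; exact absurd rfl hc
      · rfl

set_option maxRecDepth 4000 in
theorem main_eq (cs : List Char) :
    pvIsCorrectGo pvRegexpDef (PySem.Set.ofList [4]) 0 cs =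
      (if (PySem.Chars.startswith cs ['<', '!'] && PySem.Chars.endswith cs ['>']) then
         pvHeadE (fun t => t.all pvGoodChar)
           (pvDropDOCTYP (PySem.Chars.slice cs (some 2) (some (-1))))
       else false) := by
  match cs with
  | [] => rw [startswith_short [] (by simp)]; rfl
  | [c] =>
    rw [startswith_short [c] (by simp)]
    simp only [Bool.false_and, if_neg (by simp : ¬ (false = true))]
    by_cases hc : c = '<'
    · subst hc; rfl
    · have hstep : pvIsCorrectGo pvRegexpDef (PySem.Set.ofList [4]) 0 [c] =
          (match (PySem.Dict.ofList [('<', (1:Int))]).get? c with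
           | none => false
           | some s' => pvIsCorrectGo pvRegexpDef (PySem.Set.ofList [4]) s' []) := rfl
      rw [hstep, show (PySem.Dict.ofList [('<', (1:Int))]) = { items := [('<', (1:Int))] } from rfl,
          PySem.Dict.get?_mk_cons]
      rw [if_neg (by simp [Ne.symm hc])]
      rfl
  | c :: d :: rest =>
    rw [startswith_cons_cons]
    by_cases hcd : c = '<' ∧ d = '!'
    · obtain ⟨rfl, rfl⟩ := hcd
      rw [decide_eq_true (⟨rfl, rfl⟩ : ('<':Char) = '<' ∧ ('!':Char) = '!'), Bool.true_and]
      have hstep : pvIsCorrectGo pvRegexpDef (PySem.Set.ofList [4]) 0 ('<' :: '!' :: rest) =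
          pvIsCorrectGo pvRegexpDef (PySem.Set.ofList [4]) 2 rest := rfl
      rw [hstep, run2, central, endswith_gt,
          show PySem.Chars.slice ('<' :: '!' :: rest) (some 2) (some (-1)) =
            PySem.List.slice ('<' :: '!' :: rest) (some 2) (some (-1)) from by
              simp [PySem.Chars.slice_eq_listSlice],
          slice_two_neg_one]
      cases rest with
      | nil =>
        rw [if_neg (by simp)]
        rw [if_neg (by simp : ¬ (decide (('<' :: '!' :: ([]:List Char)).getLast? = some '>') = true))]
      | cons e es =>
        rw [List.getLast?_cons_cons, List.getLast?_cons_cons]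
        by_cases hlast : (e :: es).getLast? = some '>'
        · rw [if_pos hlast, if_pos (by simp [hlast])]
        · rw [if_neg hlast, if_neg (by simp [hlast])]
    · rw [decide_eq_false hcd, Bool.false_and, if_neg (by simp : ¬ (false = true))]
      by_cases hc : c = '<'
      · subst hc
        have hd : d ≠ '!' := fun h => hcd ⟨rfl, h⟩
        have hstep : pvIsCorrectGo pvRegexpDef (PySem.Set.ofList [4]) 0 ('<' :: d :: rest) =
            (match (PySem.Dict.ofList [('!', (2:Int))]).get? d with
             | none => false
             | some s' => pvIsCorrectGo pvRegexpDef (PySem.Set.ofList [4]) s' rest) := rfl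
        rw [hstep, show (PySem.Dict.ofList [('!', (2:Int))]) = { items := [('!', (2:Int))] } from rfl,
            PySem.Dict.get?_mk_cons, if_neg (by simp [Ne.symm hd])]
        rfl
      · have hstep : pvIsCorrectGo pvRegexpDef (PySem.Set.ofList [4]) 0 (c :: d :: rest) =
            (match (PySem.Dict.ofList [('<', (1:Int))]).get? c with
             | none => false
             | some s' => pvIsCorrectGo pvRegexpDef (PySem.Set.ofList [4]) s' (d :: rest)) := rfl
        rw [hstep, show (PySem.Dict.ofList [('<', (1:Int))]) = { items := [('<', (1:Int))] } from rfl,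
            PySem.Dict.get?_mk_cons, if_neg (by simp [Ne.symm hc])]
        rfl

theorem is_doctype_eq (value : String) : is_doctype value = is_doctype_alt value := by
  show pvIsCorrectGo pvRegexpDef (PySem.Set.ofList [4]) 0 value.toList = is_doctype_alt value
  rw [main_eq]
  unfold is_doctype_alt
  by_cases h : (PySem.Chars.startswith value.toList ['<', '!'] && PySem.Chars.endswith value.toList ['>']) = true
  · rw [if_pos h, if_pos h, match_eq_headE]
  · rw [if_neg h, if_neg h]

-- ===== VERDICT (by name: the statement is the Claim_ definition above) =====
theorem is_doctype_spec : Claim_equal_is_doctype := by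
  intro value _
  exact is_doctype_eq value
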